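-- pv_equiv track=rewrite | github.com/crhaufe/bgmodeling | Model/helper_w_module.py | GetHardwareComponentList
-- ===== SOURCE A (Python) =====
-- def GetHardwareComponentList(config):
--     hardware_component_list = [\
--         'M1NatGe_bulk',\
--         'M2NatGe_bulk',\
--         'M1EnrGe_bulk',\
--         'M2EnrGe_bulk',\
--         'M1Bellows_bulk',\
--         'M2Bellows_bulk',\
--         'M1DUStringCopper_bulk',\
--         'M2DUStringCopper_bulk',\
--         'M1CryostatCopperFar_bulk',\
--         'M2CryostatCopperFar_bulk',\
--         'M1CryostatCopperNear_bulk',\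
--         'M2CryostatCopperNear_bulk',\
--         'M1CryostatCopperNearWeldedParts_bulk',\
--         'M2CryostatCopperNearWeldedParts_bulk',\
--         'RadShieldCuInner_bulk',\
--         'RadShieldCuOuter_bulk',\
--         'M1LMFEs_bulk',\
--         'M2LMFEs_bulk',\
--         'M1Connectors_bulk',\
--         'M2Connectors_bulk',\
--         'M1StringCables_bulk',\
--         'M1CrossarmAndCPCables_bulk',\
--         'M2StringCables_bulk',\
--         'M2CrossarmAndCPCables_bulk',\
--         'M1ThermosyphonAndShieldVespel_bulk',\
--         'M2ThermosyphonAndShieldVespel_bulk',\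
--         'M1DUPTFE_bulk',\
--         'M2DUPTFE_bulk',\
--         'M1Seals_bulk',\
--         'M2Seals_bulk',\
--         'N2_bulk',\
--         'N2_surf',\
--         'RadShieldAssembly_001_RadShieldPb_bulk',\
--         'RadShieldAssembly_001_RadShieldPb_001_bulk',\
--         'M1DUPTFE_surf',\
--         'M2DUPTFE_surf',\
--         'M1CPInterfaceCavityBottomSurface_bulk',\
--         'M2CPInterfaceCavityBottomSurface_bulk',\
--         #'M1CalSource_linesource',\
--         #'M2CalSource_linesource',\
--         ]
--     if config == 'DS0':
--         hardware_component_list.remove('RadShieldCuInner_bulk')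
--     if config in ['DS0','DS1-2','DS7']:
--         m2_list = ['M2CrossarmAndCPCables_bulk',\
--         'M2StringCables_bulk',\
--         'M2NatGe_bulk',\
--         'M2EnrGe_bulk',\
--         'M2Bellows_bulk',\
--         'M2CryostatCopperFar_bulk',\
--         'M2CryostatCopperNear_bulk',\
--         'M2CryostatCopperNearWeldedParts_bulk',\
--         'M2LMFEs_bulk',\
--         'M2Connectors_bulk',\
--         'M2ThermosyphonAndShieldVespel_bulk',\
--         'M2DUPTFE_bulk',\
--         'M2DUPTFE_surf',\
--         'M2Seals_bulk',\
--         'M2DUStringCopper_bulk',\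
--         'M2CPInterfaceCavityBottomSurface_bulk'
--         ]
--         #n2_list = ['N2_bulk','N2_surf']
--         for hwC in m2_list: hardware_component_list.remove(hwC)
--         #for hwC in n2_list: hardware_component_list.remove(hwC)
--
--     if config == 'DS0':
--         hardware_component_list.remove('N2_bulk')
--         hardware_component_list.remove('N2_surf')
--         hardware_component_list.append('N2DS0_bulk')
--         hardware_component_list.append('N2DS0_surf')
--
--     if config in ['DS1-2','DS7']:
--         hardware_component_list.remove('N2_bulk')
--         hardware_component_list.remove('N2_surf')
--         hardware_component_list.append('N2DS127_bulk')
--         hardware_component_list.append('N2DS127_surf')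
--
--     # leave the M2 components in DS3 and M1 components in DS4
--     return hardware_component_list
-- ===== SOURCE B (Python) =====
-- M2_COMPONENTS = frozenset([
--     'M2CrossarmAndCPCables_bulk', 'M2StringCables_bulk', 'M2NatGe_bulk',
--     'M2EnrGe_bulk', 'M2Bellows_bulk', 'M2CryostatCopperFar_bulk',
--     'M2CryostatCopperNear_bulk', 'M2CryostatCopperNearWeldedParts_bulk',
--     'M2LMFEs_bulk', 'M2Connectors_bulk', 'M2ThermosyphonAndShieldVespel_bulk',
--     'M2DUPTFE_bulk', 'M2DUPTFE_surf', 'M2Seals_bulk',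
--     'M2DUStringCopper_bulk', 'M2CPInterfaceCavityBottomSurface_bulk',
-- ])
--
-- BASE_LIST = [
--     'M1NatGe_bulk', 'M2NatGe_bulk', 'M1EnrGe_bulk', 'M2EnrGe_bulk',
--     'M1Bellows_bulk', 'M2Bellows_bulk', 'M1DUStringCopper_bulk',
--     'M2DUStringCopper_bulk', 'M1CryostatCopperFar_bulk',
--     'M2CryostatCopperFar_bulk', 'M1CryostatCopperNear_bulk',
--     'M2CryostatCopperNear_bulk', 'M1CryostatCopperNearWeldedParts_bulk',
--     'M2CryostatCopperNearWeldedParts_bulk', 'RadShieldCuInner_bulk',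
--     'RadShieldCuOuter_bulk', 'M1LMFEs_bulk', 'M2LMFEs_bulk',
--     'M1Connectors_bulk', 'M2Connectors_bulk', 'M1StringCables_bulk',
--     'M1CrossarmAndCPCables_bulk', 'M2StringCables_bulk',
--     'M2CrossarmAndCPCables_bulk', 'M1ThermosyphonAndShieldVespel_bulk',
--     'M2ThermosyphonAndShieldVespel_bulk', 'M1DUPTFE_bulk', 'M2DUPTFE_bulk',
--     'M1Seals_bulk', 'M2Seals_bulk', 'N2_bulk', 'N2_surf',
--     'RadShieldAssembly_001_RadShieldPb_bulk',
--     'RadShieldAssembly_001_RadShieldPb_001_bulk', 'M1DUPTFE_surf',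
--     'M2DUPTFE_surf', 'M1CPInterfaceCavityBottomSurface_bulk',
--     'M2CPInterfaceCavityBottomSurface_bulk',
-- ]
--
--
-- def GetHardwareComponentList(config):
--     # Decide-then-filter: collect everything to drop / append, then one pass.
--     to_remove = set()
--     to_append = []
--     if config == 'DS0':
--         to_remove = M2_COMPONENTS | {'RadShieldCuInner_bulk', 'N2_bulk', 'N2_surf'}
--         to_append = ['N2DS0_bulk', 'N2DS0_surf']
--     elif config in ('DS1-2', 'DS7'):
--         to_remove = M2_COMPONENTS | {'N2_bulk', 'N2_surf'}
--         to_append = ['N2DS127_bulk', 'N2DS127_surf']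
--     return [x for x in BASE_LIST if x not in to_remove] + to_append
-- ===== Notes on version B (the rewrite author's own statement) =====
-- stated objective: simpler
-- what changed: Replaced the chain of in-place list.remove calls and the per-branch removal loop by a decide-then-filter pass: branches only collect a removal set and an append list, and the result is one comprehension over the base list plus the appends.
import Mathlib
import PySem

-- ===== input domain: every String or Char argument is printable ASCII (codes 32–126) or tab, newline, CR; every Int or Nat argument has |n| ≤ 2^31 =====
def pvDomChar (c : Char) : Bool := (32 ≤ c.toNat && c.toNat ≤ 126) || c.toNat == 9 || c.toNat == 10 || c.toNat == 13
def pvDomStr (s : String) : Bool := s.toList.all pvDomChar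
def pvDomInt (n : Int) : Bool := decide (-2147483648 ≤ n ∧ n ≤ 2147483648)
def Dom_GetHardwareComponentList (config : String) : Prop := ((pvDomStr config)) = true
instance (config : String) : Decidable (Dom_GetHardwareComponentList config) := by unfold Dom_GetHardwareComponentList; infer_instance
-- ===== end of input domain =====

-- B restructures A's chain of in-place list.remove calls into a decide-then-filter pass
-- (collect a removal set and an append list per branch, then one filter + append): simpler.

-- ===== PORT A =====
-- Python list.remove raises ValueError when the element is absent; in A every removed
-- element is present in the branch that removes it, so the `.getD xs` default is never used.
def pyRemove (xs : List String) (x : String) : List String :=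
  (PySem.List.remove? xs x).getD xs

def pvBaseListA : List String :=
  ["M1NatGe_bulk", "M2NatGe_bulk", "M1EnrGe_bulk", "M2EnrGe_bulk",
   "M1Bellows_bulk", "M2Bellows_bulk", "M1DUStringCopper_bulk",
   "M2DUStringCopper_bulk", "M1CryostatCopperFar_bulk",
   "M2CryostatCopperFar_bulk", "M1CryostatCopperNear_bulk",
   "M2CryostatCopperNear_bulk", "M1CryostatCopperNearWeldedParts_bulk",
   "M2CryostatCopperNearWeldedParts_bulk", "RadShieldCuInner_bulk",
   "RadShieldCuOuter_bulk", "M1LMFEs_bulk", "M2LMFEs_bulk",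
   "M1Connectors_bulk", "M2Connectors_bulk", "M1StringCables_bulk",
   "M1CrossarmAndCPCables_bulk", "M2StringCables_bulk",
   "M2CrossarmAndCPCables_bulk", "M1ThermosyphonAndShieldVespel_bulk",
   "M2ThermosyphonAndShieldVespel_bulk", "M1DUPTFE_bulk", "M2DUPTFE_bulk",
   "M1Seals_bulk", "M2Seals_bulk", "N2_bulk", "N2_surf",
   "RadShieldAssembly_001_RadShieldPb_bulk",
   "RadShieldAssembly_001_RadShieldPb_001_bulk", "M1DUPTFE_surf",
   "M2DUPTFE_surf", "M1CPInterfaceCavityBottomSurface_bulk",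
   "M2CPInterfaceCavityBottomSurface_bulk"]

def pvM2ListA : List String :=
  ["M2CrossarmAndCPCables_bulk", "M2StringCables_bulk", "M2NatGe_bulk",
   "M2EnrGe_bulk", "M2Bellows_bulk", "M2CryostatCopperFar_bulk",
   "M2CryostatCopperNear_bulk", "M2CryostatCopperNearWeldedParts_bulk",
   "M2LMFEs_bulk", "M2Connectors_bulk", "M2ThermosyphonAndShieldVespel_bulk",
   "M2DUPTFE_bulk", "M2DUPTFE_surf", "M2Seals_bulk",
   "M2DUStringCopper_bulk", "M2CPInterfaceCavityBottomSurface_bulk"]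

def GetHardwareComponentList (config : String) : List String :=
  let l0 := pvBaseListA
  let l1 := if config == "DS0" then pyRemove l0 "RadShieldCuInner_bulk" else l0
  let l2 := if config ∈ ["DS0", "DS1-2", "DS7"] then
              pvM2ListA.foldl (fun acc hwC => pyRemove acc hwC) l1
            else l1
  let l3 := if config == "DS0" then
              (pyRemove (pyRemove l2 "N2_bulk") "N2_surf")
                ++ ["N2DS0_bulk", "N2DS0_surf"]
            else l2
  let l4 := if config ∈ ["DS1-2", "DS7"] then
              (pyRemove (pyRemove l3 "N2_bulk") "N2_surf")
                ++ ["N2DS127_bulk", "N2DS127_surf"]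
            else l3
  l4

-- ===== PORT B =====
def pvM2SetB : PySem.Set String := PySem.Set.ofList pvM2ListA

def GetHardwareComponentList_alt (config : String) : List String :=
  let (toRemove, toAppend) : PySem.Set String × List String :=
    if config == "DS0" then
      (PySem.Set.union pvM2SetB ["RadShieldCuInner_bulk", "N2_bulk", "N2_surf"],
       ["N2DS0_bulk", "N2DS0_surf"])
    else if config ∈ ["DS1-2", "DS7"] then
      (PySem.Set.union pvM2SetB ["N2_bulk", "N2_surf"],
       ["N2DS127_bulk", "N2DS127_surf"])
    else (PySem.Set.empty, [])
  (pvBaseListA.filter (fun x => !(PySem.Set.contains toRemove x))) ++ toAppend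

-- ===== PRECONDITION & SPEC =====
def Spec_GetHardwareComponentList (config : String) (out : List String) : Prop := out = GetHardwareComponentList_alt config
instance (config : String) (out : List String) : Decidable (Spec_GetHardwareComponentList config out) := by unfold Spec_GetHardwareComponentList; infer_instance

-- ===== CLAIM (what is proved, stated in full; the proofs are below) =====
def Claim_equal_GetHardwareComponentList : Prop := ∀ (config : String), Dom_GetHardwareComponentList config → Spec_GetHardwareComponentList config (GetHardwareComponentList config)

-- ===== LEMMAS AND PROOFS =====
theorem pv_eq_of_other (config : String) (h0 : config ≠ "DS0")
    (h1 : config ≠ "DS1-2") (h2 : config ≠ "DS7") :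
    GetHardwareComponentList config = GetHardwareComponentList_alt config := by
  unfold GetHardwareComponentList GetHardwareComponentList_alt
  simp [h0, h1, h2, PySem.Set.empty, PySem.Set.contains]

-- ===== VERDICT (by name: the statement is the Claim_ definition above) =====
theorem GetHardwareComponentList_spec : Claim_equal_GetHardwareComponentList := by
  intro config _
  unfold Spec_GetHardwareComponentList
  by_cases h0 : config = "DS0"
  · subst h0; decide
  · by_cases h1 : config = "DS1-2"
    · subst h1; decide
    · by_cases h2 : config = "DS7"
      · subst h2; decide
      · exact pv_eq_of_other config h0 h1 h2
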